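-- pv_equiv track=rewrite | github.com/mintropy/PS | BAEKJOON/Python/1000/1400/1450.py | solution
-- ===== SOURCE A (Python) =====
-- from itertools import combinations
--
-- def solution(N: int, C: int, nums: list[int]) -> int:
--     group1, group2 = [0], [0]
--     mid = N // 2
--     for i in range(1, mid + 1):
--         for comb in combinations(nums[:mid], i):
--             group1.append(sum(comb))
--     for i in range(1, N - mid + 1):
--         for comb in combinations(nums[mid:], i):
--             group2.append(sum(comb))
--     group1.sort()
--     group2.sort()
--     ans = 0
--     idx = len(group1) - 1
--     for y in group2:
--         if y > C:
--             break
--         while idx >= 0: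
--             x = group1[idx]
--             if x + y > C:
--                 idx -= 1
--             else:
--                 break
--         ans += idx + 1
--     return ans
-- ===== SOURCE B (Python) =====
-- from itertools import combinations
--
-- def bisect_right(a, x):
--     lo, hi = 0, len(a)
--     while lo < hi:
--         m = (lo + hi) // 2
--         if a[m] <= x:
--             lo = m + 1
--         else:
--             hi = m
--     return lo
--
-- def solution(N: int, C: int, nums: list[int]) -> int:
--     mid = N // 2
--     group1 = [0] + [sum(c) for i in range(1, mid + 1) for c in combinations(nums[:mid], i)]
--     group2 = [0] + [sum(c) for i in range(1, N - mid + 1) for c in combinations(nums[mid:], i)]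
--     group1.sort()
--     ans = 0
--     for y in group2:
--         if y <= C:
--             ans += bisect_right(group1, C - y)
--     return ans
-- ===== Notes on version B (the rewrite author's own statement) =====
-- stated objective: alternative
-- what changed: A sorts both halves' subset-sum lists and counts pairs with a monotone two-pointer sweep that mutates a shared index and breaks early; B never sorts group2 and instead, for each y in it with y <= C, counts matching group1 sums with a hand-written binary search (bisect_right) into the sorted group1.
import Mathlib
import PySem

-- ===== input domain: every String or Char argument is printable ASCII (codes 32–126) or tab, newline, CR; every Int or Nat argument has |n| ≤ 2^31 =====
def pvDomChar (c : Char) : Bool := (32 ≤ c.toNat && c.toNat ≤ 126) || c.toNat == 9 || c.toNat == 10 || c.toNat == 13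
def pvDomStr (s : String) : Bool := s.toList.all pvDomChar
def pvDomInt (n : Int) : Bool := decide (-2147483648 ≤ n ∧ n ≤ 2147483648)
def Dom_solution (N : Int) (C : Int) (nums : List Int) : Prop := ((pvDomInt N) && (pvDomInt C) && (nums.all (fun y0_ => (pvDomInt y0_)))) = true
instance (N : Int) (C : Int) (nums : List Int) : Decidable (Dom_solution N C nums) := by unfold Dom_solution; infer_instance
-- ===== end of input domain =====

-- B replaces A's sort-both-halves + monotone two-pointer counting pass by an unsorted
-- sweep over group2 with a hand-written binary search (bisect_right) into sorted group1;
-- group2 is never sorted and there is no break/pointer state.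

-- ===== PORT A =====

-- while idx >= 0: x = group1[idx]; if x + y > C: idx -= 1 else: break
def shrinkA (C : Int) (g1 : List Int) (y : Int) (idx : Int) : Int :=
  if _h : 0 ≤ idx then
    let x := PySem.List.pyGetD g1 idx 0
    if x + y > C then shrinkA C g1 y (idx - 1) else idx
  else idx
termination_by (idx + 1).toNat
decreasing_by omega

-- for y in group2: if y > C: break; …; ans += idx + 1
def loopA (C : Int) (g1 : List Int) : List Int → Int → Int → Int
  | [], ans, _ => ans
  | y :: ys, ans, idx =>
    if y > C then ans
    else
      let idx' := shrinkA C g1 y idx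
      loopA C g1 ys (ans + (idx' + 1)) idx'

def solution (N : Int) (C : Int) (nums : List Int) : Int :=
  let mid := PySem.Int.floordiv N 2
  let group1 := (PySem.List.pyRange 1 (mid + 1) 1).foldl
    (fun g i => (PySem.List.combinations (PySem.List.slice nums none (some mid)) i.toNat).foldl
      (fun g comb => g ++ [comb.sum]) g) [0]
  let group2 := (PySem.List.pyRange 1 (N - mid + 1) 1).foldl
    (fun g i => (PySem.List.combinations (PySem.List.slice nums (some mid) none) i.toNat).foldl
      (fun g comb => g ++ [comb.sum]) g) [0]
  let g1 := PySem.List.sorted group1 (fun x => x) false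
  let g2 := PySem.List.sorted group2 (fun x => x) false
  loopA C g1 g2 0 (PySem.List.len g1 - 1)

-- ===== PORT B =====

-- hand-written bisect_right of Source B (Source B may not import bisect): the while lo < hi loop
def brLoop (a : List Int) (x : Int) (lo hi : Int) : Int :=
  if _h : lo < hi then
    let m := PySem.Int.floordiv (lo + hi) 2
    if PySem.List.pyGetD a m 0 ≤ x then brLoop a x (m + 1) hi else brLoop a x lo m
  else lo
termination_by (hi - lo).toNat
decreasing_by
  · have := (PySem.Int.floordiv_two_mid_bounds (lo := lo) (hi := hi) (by omega)).1
    omega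
  · have : PySem.Int.floordiv (lo + hi) 2 < hi :=
      (PySem.Int.floordiv_lt_iff_lt_mul (by omega)).mpr (by omega)
    omega

def bisectRightB (a : List Int) (x : Int) : Int := brLoop a x 0 (PySem.List.len a)

def solution_alt (N : Int) (C : Int) (nums : List Int) : Int :=
  let mid := PySem.Int.floordiv N 2
  let group1 := 0 :: (PySem.List.pyRange 1 (mid + 1) 1).flatMap
    (fun i => (PySem.List.combinations (PySem.List.slice nums none (some mid)) i.toNat).map List.sum)
  let group2 := 0 :: (PySem.List.pyRange 1 (N - mid + 1) 1).flatMap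
    (fun i => (PySem.List.combinations (PySem.List.slice nums (some mid) none) i.toNat).map List.sum)
  let g1 := PySem.List.sorted group1 (fun x => x) false
  group2.foldl (fun ans y => if y ≤ C then ans + bisectRightB g1 (C - y) else ans) 0

-- ===== PRECONDITION & SPEC =====
def Spec_solution (N : Int) (C : Int) (nums : List Int) (out : Int) : Prop := out = solution_alt N C nums
instance (N : Int) (C : Int) (nums : List Int) (out : Int) : Decidable (Spec_solution N C nums out) := by unfold Spec_solution; infer_instance

-- ===== CLAIM (what is proved, stated in full; the proofs are below) =====
def Claim_equal_solution : Prop := ∀ (N : Int) (C : Int) (nums : List Int), Dom_solution N C nums → Spec_solution N C nums (solution N C nums)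

-- ===== LEMMAS AND PROOFS =====

-- the nested append loop of A builds exactly B's flatMap comprehension
theorem nested_foldl_eq_flatMap (r : List Int) (h : List Int) (init : List Int) :
    r.foldl (fun g i => (PySem.List.combinations h i.toNat).foldl
      (fun g comb => g ++ [comb.sum]) g) init
    = init ++ r.flatMap (fun i => (PySem.List.combinations h i.toNat).map List.sum) := by
  simp only [PySem.List.foldl_append_singleton_eq_map]
  exact PySem.List.foldl_append_eq_flatMap _ _ _

-- number of elements ≤ t
def cnt (l : List Int) (t : Int) : Nat := l.countP (fun x => decide (x ≤ t))

theorem cnt_le_length (l : List Int) (t : Int) : cnt l t ≤ l.length :=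
  List.countP_le_length

theorem cnt_mono (l : List Int) {t t' : Int} (h : t ≤ t') : cnt l t ≤ cnt l t' := by
  exact List.countP_mono_left (fun x _ hx => by
    simp only [decide_eq_true_eq] at *; omega)

-- in a sorted list, the elements ≤ t are exactly the first (cnt t) positions
theorem sorted_cnt_char (l : List Int) (hs : l.Pairwise (· ≤ ·)) (t : Int) :
    ∀ (j : Nat) (hj : j < l.length), (l[j] ≤ t ↔ j < cnt l t) := by
  induction l with
  | nil => intro j hj; simp at hj
  | cons a l ih =>
    intro j hj
    rcases List.pairwise_cons.mp hs with ⟨ha, hl⟩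
    by_cases hat : a ≤ t
    · have hc : cnt (a :: l) t = cnt l t + 1 := by
        simp [cnt, hat]
      cases j with
      | zero => simpa [hc] using hat
      | succ k =>
        have hk : k < l.length := by simpa using hj
        have := ih hl k hk
        simpa [hc] using this
    · have hc : cnt (a :: l) t = 0 := by
        have h0 : cnt l t = 0 := by
          refine List.countP_eq_zero.mpr (fun x hx => ?_)
          have := ha x hx
          simp only [decide_eq_true_eq]; omega
        simp [cnt, hat] at *
        omega
      cases j with
      | zero => simpa [hc] using hat
      | succ k =>
        have hk : k < l.length := by simpa using hj
        constructor
        · intro hle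
          exfalso
          have hmem : l[k] ∈ l := List.getElem_mem hk
          have := ha _ hmem
          simp only [List.getElem_cons_succ] at hle
          omega
        · intro hlt; simp [hc] at hlt

theorem shrinkA_eq (C : Int) (g1 : List Int) (hs : g1.Pairwise (· ≤ ·)) (y : Int) :
    ∀ idx : Int, -1 ≤ idx → idx < g1.length →
      (cnt g1 (C - y) : Int) - 1 ≤ idx →
      shrinkA C g1 y idx = (cnt g1 (C - y) : Int) - 1 := by
  intro idx
  induction idx using shrinkA.induct C g1 y with
  | case1 idx h0 x hx ih =>
    intro hm1 hlen hcnt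
    have hjlt : idx.toNat < g1.length := by omega
    have hget : PySem.List.pyGetD g1 idx 0 = g1[idx.toNat] :=
      PySem.List.pyGetD_eq_getElem g1 0 h0 (by exact_mod_cast hlen)
    have hx' : PySem.List.pyGetD g1 idx 0 + y > C := hx
    have hgt : ¬ (g1[idx.toNat] ≤ C - y) := by rw [hget] at hx'; omega
    have hcle : cnt g1 (C - y) ≤ idx.toNat := by
      by_contra hlt
      exact hgt ((sorted_cnt_char g1 hs (C - y) idx.toNat hjlt).mpr (by omega))
    rw [shrinkA, dif_pos h0]
    show (if PySem.List.pyGetD g1 idx 0 + y > C then shrinkA C g1 y (idx - 1) else idx)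
        = (cnt g1 (C - y) : Int) - 1
    rw [if_pos hx']
    exact ih (by omega) (by omega) (by omega)
  | case2 idx h0 x hx =>
    intro hm1 hlen hcnt
    have hjlt : idx.toNat < g1.length := by omega
    have hget : PySem.List.pyGetD g1 idx 0 = g1[idx.toNat] :=
      PySem.List.pyGetD_eq_getElem g1 0 h0 (by exact_mod_cast hlen)
    have hx' : ¬ (PySem.List.pyGetD g1 idx 0 + y > C) := hx
    have hle : g1[idx.toNat] ≤ C - y := by rw [hget] at hx'; omega
    have hlt : idx.toNat < cnt g1 (C - y) :=
      (sorted_cnt_char g1 hs (C - y) idx.toNat hjlt).mp hle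
    rw [shrinkA, dif_pos h0]
    show (if PySem.List.pyGetD g1 idx 0 + y > C then shrinkA C g1 y (idx - 1) else idx)
        = (cnt g1 (C - y) : Int) - 1
    rw [if_neg hx']
    omega
  | case3 idx h =>
    intro hm1 hlen hcnt
    rw [shrinkA, dif_neg h]
    omega

theorem loopA_eq (C : Int) (g1 : List Int) (hs : g1.Pairwise (· ≤ ·)) :
    ∀ (ys : List Int) (ans idx : Int), ys.Pairwise (· ≤ ·) →
      -1 ≤ idx → idx < g1.length →
      (∀ y ∈ ys, y ≤ C → (cnt g1 (C - y) : Int) - 1 ≤ idx) →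
      loopA C g1 ys ans idx
        = ans + ((ys.filter (fun y => decide (y ≤ C))).map (fun y => (cnt g1 (C - y) : Int))).sum := by
  intro ys
  induction ys with
  | nil => intro ans idx _ _ _ _; simp [loopA]
  | cons y ys ih =>
    intro ans idx hp hm1 hlen hinv
    rcases List.pairwise_cons.mp hp with ⟨hy, hp'⟩
    rw [loopA]
    by_cases hyC : y > C
    · rw [if_pos hyC]
      have hnil : (y :: ys).filter (fun y => decide (y ≤ C)) = [] := by
        refine List.filter_eq_nil_iff.mpr (fun a ha => ?_)
        rcases List.mem_cons.mp ha with h | h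
        · subst h; simp; omega
        · have := hy a h; simp; omega
      rw [hnil]; simp
    · rw [if_neg hyC]
      have hyle : y ≤ C := by omega
      have hsh := shrinkA_eq C g1 hs y idx hm1 hlen (hinv y (by simp) hyle)
      have hcl := cnt_le_length g1 (C - y)
      rw [hsh, ih (ans + ((cnt g1 (C - y) : Int) - 1 + 1)) ((cnt g1 (C - y) : Int) - 1) hp'
            (by omega) (by omega)
            (fun y' hy' hy'C => by
              have hmono := cnt_mono g1 (show C - y' ≤ C - y by have := hy y' hy'; omega)
              omega)]
      have hf : (y :: ys).filter (fun y => decide (y ≤ C))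
          = y :: ys.filter (fun y => decide (y ≤ C)) := by
        simp [hyle]
      rw [hf, List.map_cons, List.sum_cons]
      ring

theorem brLoop_eq (a : List Int) (x : Int) (hs : a.Pairwise (· ≤ ·)) :
    ∀ lo hi : Int, 0 ≤ lo → lo ≤ (cnt a x : Int) → (cnt a x : Int) ≤ hi → hi ≤ a.length →
      brLoop a x lo hi = (cnt a x : Int) := by
  intro lo hi
  induction lo, hi using brLoop.induct a x with
  | case1 lo hi hlt m hm ih =>
    intro h0 hloc hchi hhl
    have hmlo : lo ≤ PySem.Int.floordiv (lo + hi) 2 :=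
      (PySem.Int.floordiv_two_mid_bounds (by omega)).1
    have hmhi : PySem.Int.floordiv (lo + hi) 2 < hi :=
      (PySem.Int.floordiv_lt_iff_lt_mul (by omega)).mpr (by omega)
    have hjlt : (PySem.Int.floordiv (lo + hi) 2).toNat < a.length := by omega
    have hget : PySem.List.pyGetD a (PySem.Int.floordiv (lo + hi) 2) 0
        = a[(PySem.Int.floordiv (lo + hi) 2).toNat] :=
      PySem.List.pyGetD_eq_getElem a 0 (by omega) (by exact_mod_cast (by omega : PySem.Int.floordiv (lo + hi) 2 < (a.length : Int)))
    have hm' : PySem.List.pyGetD a (PySem.Int.floordiv (lo + hi) 2) 0 ≤ x := hm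
    have hlt' : (PySem.Int.floordiv (lo + hi) 2).toNat < cnt a x :=
      (sorted_cnt_char a hs x _ hjlt).mp (by rw [← hget]; exact hm')
    rw [brLoop, dif_pos hlt]
    show (if PySem.List.pyGetD a (PySem.Int.floordiv (lo + hi) 2) 0 ≤ x
          then brLoop a x (PySem.Int.floordiv (lo + hi) 2 + 1) hi
          else brLoop a x lo (PySem.Int.floordiv (lo + hi) 2)) = (cnt a x : Int)
    rw [if_pos hm']
    exact ih (by omega) (by omega) hchi hhl
  | case2 lo hi hlt m hm ih =>
    intro h0 hloc hchi hhl
    have hmlo : lo ≤ PySem.Int.floordiv (lo + hi) 2 :=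
      (PySem.Int.floordiv_two_mid_bounds (by omega)).1
    have hmhi : PySem.Int.floordiv (lo + hi) 2 < hi :=
      (PySem.Int.floordiv_lt_iff_lt_mul (by omega)).mpr (by omega)
    have hjlt : (PySem.Int.floordiv (lo + hi) 2).toNat < a.length := by omega
    have hget : PySem.List.pyGetD a (PySem.Int.floordiv (lo + hi) 2) 0
        = a[(PySem.Int.floordiv (lo + hi) 2).toNat] :=
      PySem.List.pyGetD_eq_getElem a 0 (by omega) (by exact_mod_cast (by omega : PySem.Int.floordiv (lo + hi) 2 < (a.length : Int)))
    have hm' : ¬ PySem.List.pyGetD a (PySem.Int.floordiv (lo + hi) 2) 0 ≤ x := hm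
    have hcle : cnt a x ≤ (PySem.Int.floordiv (lo + hi) 2).toNat := by
      by_contra hc
      exact hm' (by rw [hget]; exact (sorted_cnt_char a hs x _ hjlt).mpr (by omega))
    rw [brLoop, dif_pos hlt]
    show (if PySem.List.pyGetD a (PySem.Int.floordiv (lo + hi) 2) 0 ≤ x
          then brLoop a x (PySem.Int.floordiv (lo + hi) 2 + 1) hi
          else brLoop a x lo (PySem.Int.floordiv (lo + hi) 2)) = (cnt a x : Int)
    rw [if_neg hm']
    exact ih h0 hloc (by omega) (by omega)
  | case3 lo hi h =>
    intro h0 hloc hchi hhl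
    rw [brLoop, dif_neg h]
    omega

theorem bisectRightB_eq (a : List Int) (x : Int) (hs : a.Pairwise (· ≤ ·)) :
    bisectRightB a x = (cnt a x : Int) := by
  unfold bisectRightB
  have hlen : PySem.List.len a = (a.length : Int) := PySem.List.len_eq a
  rw [hlen]
  exact brLoop_eq a x hs 0 (a.length : Int) (by omega)
    (by have := cnt_le_length a x; omega) (by have := cnt_le_length a x; omega) (by omega)

theorem counting_eq (C : Int) (G1 G2 : List Int) :
    loopA C (PySem.List.sorted G1 (fun x => x) false) (PySem.List.sorted G2 (fun x => x) false) 0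
      (PySem.List.len (PySem.List.sorted G1 (fun x => x) false) - 1)
    = G2.foldl (fun ans y => if y ≤ C then
        ans + bisectRightB (PySem.List.sorted G1 (fun x => x) false) (C - y) else ans) 0 := by
  set g1 := PySem.List.sorted G1 (fun x => x) false with hg1
  set g2 := PySem.List.sorted G2 (fun x => x) false with hg2
  have hs : g1.Pairwise (· ≤ ·) := by
    simpa [hg1] using PySem.List.sorted_pairwise G1 (fun x => x)
  have hp : g2.Pairwise (· ≤ ·) := by
    simpa [hg2] using PySem.List.sorted_pairwise G2 (fun x => x)
  rw [PySem.List.len_eq g1]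
  rw [loopA_eq C g1 hs g2 0 ((g1.length : Int) - 1) hp (by omega) (by omega)
      (fun y _ _ => by have := cnt_le_length g1 (C - y); omega)]
  rw [PySem.List.foldl_ite_eq_foldl_filter (p := fun y => y ≤ C)
      (f := fun ans y => ans + bisectRightB g1 (C - y)) G2 0]
  rw [PySem.List.foldl_add (List.filter (fun y => decide (y ≤ C)) G2)
      (fun y => bisectRightB g1 (C - y)) 0]
  have hb : (fun y => bisectRightB g1 (C - y)) = fun y => (cnt g1 (C - y) : Int) :=
    funext (fun y => bisectRightB_eq g1 (C - y) hs)
  rw [hb]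
  have hperm : ((g2.filter (fun y => decide (y ≤ C))).map
        (fun y => (cnt g1 (C - y) : Int))).Perm
      ((G2.filter (fun y => decide (y ≤ C))).map (fun y => (cnt g1 (C - y) : Int))) :=
    ((PySem.List.sorted_perm G2 (fun x => x) false).filter _).map _
  rw [hperm.sum_eq]

-- ===== VERDICT (by name: the statement is the Claim_ definition above) =====
theorem solution_spec : Claim_equal_solution := by
  intro N C nums _
  show solution N C nums = solution_alt N C nums
  simp only [solution, solution_alt, nested_foldl_eq_flatMap, List.singleton_append]
  exact counting_eq C _ _
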